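-- pv_equiv track=rewrite | github.com/naicopb/NB-Discretizations-Football | foults_results/auxiliars/_5_main_componentes_moftbs.py | discriminaCantidades
-- ===== SOURCE A (Python) =====
-- def discriminaCantidades(array, extremoInferior, extremoSuperior):
--     cantFavor = 0
--     cantContra = 0
--     for i in range(0, len(array)):
--         if array[i] >= extremoInferior and array[i] < extremoSuperior:
--             cantFavor += 1
--         else:
--             cantContra += 1
--     return cantFavor, cantContra
-- ===== SOURCE B (Python) =====
-- def discriminaCantidades(array, extremoInferior, extremoSuperior):
--     # divide-and-conquer: split the list in half, count each half, add the pairs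
--     if len(array) == 0:
--         return 0, 0
--     if len(array) == 1:
--         x = array[0]
--         if extremoInferior <= x < extremoSuperior:
--             return 1, 0
--         return 0, 1
--     m = len(array) // 2
--     f1, c1 = discriminaCantidades(array[:m], extremoInferior, extremoSuperior)
--     f2, c2 = discriminaCantidades(array[m:], extremoInferior, extremoSuperior)
--     return f1 + f2, c1 + c2
-- ===== Notes on version B (the rewrite author's own statement) =====
-- stated objective: alternative
-- what changed: B counts by divide-and-conquer: it splits the list in half, recursively counts the in-range/out-of-range pairs of each half and adds them, instead of A's single index loop with two accumulators; correct because the counts are additive over concatenation.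
import Mathlib
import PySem

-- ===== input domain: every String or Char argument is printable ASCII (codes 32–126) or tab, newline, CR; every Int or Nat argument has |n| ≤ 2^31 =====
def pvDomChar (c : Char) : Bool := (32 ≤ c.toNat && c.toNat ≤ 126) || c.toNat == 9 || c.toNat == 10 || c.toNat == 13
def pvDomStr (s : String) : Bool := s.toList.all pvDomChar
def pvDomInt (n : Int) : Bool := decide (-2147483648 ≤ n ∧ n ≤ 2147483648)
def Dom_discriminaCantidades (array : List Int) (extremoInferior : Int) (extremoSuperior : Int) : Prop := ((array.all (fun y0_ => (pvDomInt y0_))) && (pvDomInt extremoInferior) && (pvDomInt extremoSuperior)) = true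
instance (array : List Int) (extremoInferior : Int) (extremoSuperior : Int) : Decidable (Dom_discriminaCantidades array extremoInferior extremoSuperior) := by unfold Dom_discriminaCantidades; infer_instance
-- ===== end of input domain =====

-- B replaces A's index loop with two paired counters by a divide-and-conquer count (split in half, count halves, add) — an alternative decomposition, same result since counts are additive over concatenation.


-- ===== PORT A =====
-- for i in range(0, len(array)): two counters, if/else on array[i]
def discriminaCantidades (array : List Int) (extremoInferior : Int) (extremoSuperior : Int) : Int × Int :=
  (PySem.List.pyRange 0 (PySem.List.len array)).foldl
    (fun (s : Int × Int) i =>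
      if PySem.List.pyGetD array i 0 ≥ extremoInferior ∧ PySem.List.pyGetD array i 0 < extremoSuperior then
        (s.1 + 1, s.2)
      else
        (s.1, s.2 + 1))
    (0, 0)

-- ===== PORT B =====
-- divide and conquer: base cases len 0 / len 1, otherwise recurse on array[:m] and array[m:] with m = len(array)//2 and add the pairs
def discriminaCantidades_alt (array : List Int) (extremoInferior : Int) (extremoSuperior : Int) : Int × Int :=
  if PySem.List.len array = 0 then (0, 0)
  else if PySem.List.len array = 1 then
    let x := PySem.List.pyGetD array 0 0
    if extremoInferior ≤ x ∧ x < extremoSuperior then (1, 0) else (0, 1)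
  else
    let m := PySem.Int.floordiv (PySem.List.len array) 2
    let p1 := discriminaCantidades_alt (PySem.List.slice array none (some m)) extremoInferior extremoSuperior
    let p2 := discriminaCantidades_alt (PySem.List.slice array (some m) none) extremoInferior extremoSuperior
    (p1.1 + p2.1, p1.2 + p2.2)
termination_by array.length
decreasing_by
  · have hE : PySem.List.len array = (array.length : Int) := by simp
    simp only [hE]
    rw [show PySem.Int.floordiv (↑array.length) 2 = ((array.length / 2 : Nat) : Int) from
      PySem.Int.floordiv_natCast array.length 2, PySem.List.slice_to_natCast,
      List.length_take]
    omega
  · have hE : PySem.List.len array = (array.length : Int) := by simp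
    simp only [hE]
    rw [show PySem.Int.floordiv (↑array.length) 2 = ((array.length / 2 : Nat) : Int) from
      PySem.Int.floordiv_natCast array.length 2, PySem.List.slice_from_natCast,
      List.length_drop]
    omega

-- ===== PRECONDITION & SPEC =====
def Spec_discriminaCantidades (array : List Int) (extremoInferior : Int) (extremoSuperior : Int) (out : Int × Int) : Prop := out = discriminaCantidades_alt array extremoInferior extremoSuperior
instance (array : List Int) (extremoInferior : Int) (extremoSuperior : Int) (out : Int × Int) : Decidable (Spec_discriminaCantidades array extremoInferior extremoSuperior out) := by unfold Spec_discriminaCantidades; infer_instance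

-- ===== CLAIM =====
def Claim_equal_discriminaCantidades : Prop := ∀ (array : List Int) (extremoInferior : Int) (extremoSuperior : Int), Dom_discriminaCantidades array extremoInferior extremoSuperior → Spec_discriminaCantidades array extremoInferior extremoSuperior (discriminaCantidades array extremoInferior extremoSuperior)

-- ===== LEMMAS AND PROOFS =====

-- A's index loop is the element-wise loop (indices are always in range).
theorem discriminaCantidades_eq_foldl_elems (array : List Int) (lo hi : Int) :
    discriminaCantidades array lo hi =
      array.foldl (fun (s : Int × Int) x =>
        if x ≥ lo ∧ x < hi then (s.1 + 1, s.2) else (s.1, s.2 + 1)) (0, 0) := by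
  unfold discriminaCantidades
  conv_rhs => rw [← PySem.List.map_pyGetD_pyRange_zero array 0]
  rw [List.foldl_map]

-- The paired-counter fold over any list, from any start state.
theorem foldl_pair_eq (lo hi : Int) (l : List Int) (a b : Int) :
    l.foldl (fun (s : Int × Int) x =>
        if x ≥ lo ∧ x < hi then (s.1 + 1, s.2) else (s.1, s.2 + 1)) (a, b) =
      (a + (l.countP (fun x => lo ≤ x && x < hi) : Int),
       b + ((l.length : Int) - (l.countP (fun x => lo ≤ x && x < hi) : Int))) := by
  induction l generalizing a b with
  | nil => simp
  | cons y t ih =>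
    simp only [List.foldl_cons, List.countP_cons, List.length_cons]
    by_cases h : y ≥ lo ∧ y < hi
    · rw [if_pos h, ih]
      have : (lo ≤ y && y < hi) = true := by simp; exact ⟨h.1, h.2⟩
      simp [this]; omega
    · rw [if_neg h, ih]
      have : (lo ≤ y && y < hi) = false := by
        rcases not_and_or.mp h with h1 | h1 <;> simp <;> intro hx <;> omega
      simp [this]; omega

-- B's divide-and-conquer computes the same closed form, by strong induction on length.
theorem alt_eq_counts (lo hi : Int) :
    ∀ (n : Nat) (l : List Int), l.length ≤ n →
      discriminaCantidades_alt l lo hi =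
        ((l.countP (fun x => lo ≤ x && x < hi) : Int),
         (l.length : Int) - (l.countP (fun x => lo ≤ x && x < hi) : Int)) := by
  intro n
  induction n with
  | zero =>
    intro l hl
    have : l = [] := List.eq_nil_of_length_eq_zero (by omega)
    subst this
    simp [discriminaCantidades_alt, PySem.List.len_eq]
  | succ n ih =>
    intro l hl
    rw [discriminaCantidades_alt]
    simp only [PySem.List.len_eq]
    by_cases h0 : l.length = 0
    · have : l = [] := List.eq_nil_of_length_eq_zero h0
      subst this; simp
    · by_cases h1 : l.length = 1
      · obtain ⟨x, hx⟩ : ∃ x, l = [x] := List.length_eq_one_iff.mp h1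
        subst hx
        rw [if_neg (by norm_num), if_pos (by norm_num)]
        by_cases hx : lo ≤ x ∧ x < hi
        · rw [if_pos (by simpa [PySem.List.pyGetD] using hx)]
          simp [hx.1, hx.2]
        · rw [if_neg (by simpa [PySem.List.pyGetD] using hx)]
          have : (lo ≤ x && x < hi) = false := by
            rcases not_and_or.mp hx with h | h <;> simp <;> intro <;> omega
          simp [this]
      · rw [if_neg (by exact_mod_cast h0), if_neg (by exact_mod_cast h1)]
        rw [show PySem.Int.floordiv (↑l.length) 2 = ((l.length / 2 : Nat) : Int) from
          PySem.Int.floordiv_natCast l.length 2,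
          PySem.List.slice_to_natCast, PySem.List.slice_from_natCast]
        rw [ih (l.take (l.length / 2)) (by simp; omega),
            ih (l.drop (l.length / 2)) (by simp; omega)]
        have hcount : (l.take (l.length / 2)).countP (fun x => lo ≤ x && x < hi) +
            (l.drop (l.length / 2)).countP (fun x => lo ≤ x && x < hi) =
            l.countP (fun x => lo ≤ x && x < hi) := by
          rw [← List.countP_append, List.take_append_drop]
        have hlen : (l.take (l.length / 2)).length + (l.drop (l.length / 2)).length = l.length := by
          simp; omega
        simp only [Prod.mk.injEq]
        constructor <;> omega

-- ===== VERDICT =====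
theorem discriminaCantidades_spec : Claim_equal_discriminaCantidades := by
  intro array lo hi _
  unfold Spec_discriminaCantidades
  rw [discriminaCantidades_eq_foldl_elems, foldl_pair_eq,
    alt_eq_counts lo hi array.length array (le_refl _)]
  simp
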